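-- pv_equiv track=rewrite | github.com/ALbum3270/DeepTrace | src/graph/nodes/finalizer.py | _build_snippet_map
-- ===== SOURCE A (Python) =====
-- from typing import Dict, Any, List, Tuple, Optional
--
-- def _build_snippet_map(urls: List[str], notes: List[str]) -> dict:
--     """
--     Map URL -> small snippet of note text containing it (for LLM verification).
--     """
--     snippets = {}
--     for url in urls:
--         for n in notes:
--             if url in n:
--                 idx = n.find(url)
--                 start = max(0, idx - 200)
--                 end = min(len(n), idx + 200)
--                 snippets[url] = n[start:end]
--                 break
--     return snippets
-- ===== SOURCE B (Python) =====
-- from typing import List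
--
--
-- def _build_snippet_map(urls: List[str], notes: List[str]) -> dict:
--     """
--     Map URL -> small snippet of note text containing it (for LLM verification).
--     Note-major single pass: walk the notes once, resolving every still-pending
--     URL against the current note, instead of rescanning all notes per URL.
--     """
--     snip = {}
--     pending = list(urls)
--     for n in notes:
--         remaining = []
--         for u in pending:
--             i = n.find(u)
--             if i >= 0:
--                 start = max(0, i - 200)
--                 end = min(len(n), i + 200)
--                 snip[u] = n[start:end]
--             else:
--                 remaining.append(u)
--         pending = remaining
--     return {u: snip[u] for u in urls if u in snip}
-- ===== Notes on version B (the rewrite author's own statement) =====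
-- stated objective: alternative
-- what changed: A scans all notes anew for every URL (URL-major, with break); B makes one note-major pass keeping a shrinking list of still-unmatched URLs, records each URL's snippet at its first containing note, and rebuilds the dict in A's key order at the end.
import Mathlib
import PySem

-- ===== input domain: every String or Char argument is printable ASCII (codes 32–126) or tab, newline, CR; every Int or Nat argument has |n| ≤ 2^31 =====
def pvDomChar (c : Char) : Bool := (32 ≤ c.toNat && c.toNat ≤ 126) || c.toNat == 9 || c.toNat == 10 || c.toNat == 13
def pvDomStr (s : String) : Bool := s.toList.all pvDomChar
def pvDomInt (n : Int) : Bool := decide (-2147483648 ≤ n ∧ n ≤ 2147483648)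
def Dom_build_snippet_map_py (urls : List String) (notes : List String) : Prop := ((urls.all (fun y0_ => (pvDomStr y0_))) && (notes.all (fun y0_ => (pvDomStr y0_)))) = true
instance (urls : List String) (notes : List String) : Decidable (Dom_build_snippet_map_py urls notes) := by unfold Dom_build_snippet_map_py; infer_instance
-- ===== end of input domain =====

-- B replaces A's URL-major rescan of the notes by a single note-major pass over the
-- notes with a shrinking list of pending URLs (alternative decomposition, same worst-case cost).


-- shared value computation: n[max(0, idx-200) : min(len(n), idx+200)] with idx = n.find(url)
-- (both Pythons compute this identical expression at a hit)
def pvSnip (n url : String) : String :=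
  let idx := PySem.Str.find n url
  PySem.Str.slice n (some (max 0 (idx - 200))) (some (min (PySem.Str.len n) (idx + 200)))

-- ===== PORT A =====
-- A's inner 'for n in notes: if url in n: …; break' loop, returning the snippet it stores
def pvFindNote (url : String) : List String → Option String
  | [] => none
  | n :: rest => if PySem.Str.isIn url n then some (pvSnip n url) else pvFindNote url rest

def build_snippet_map_py (urls : List String) (notes : List String) : List (String × String) :=
  (urls.foldl (fun d url =>
      match pvFindNote url notes with
      | some s => d.insert url s
      | none => d) (PySem.Dict.empty : PySem.Dict String String)).items

-- ===== PORT B =====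
-- one note resolved against the pending URLs: (snip, remaining) accumulator
def pvNoteStep (n : String) (st : PySem.Dict String String × List String) :
    PySem.Dict String String × List String :=
  st.2.foldl (fun st2 u =>
      if 0 ≤ PySem.Str.find n u then (st2.1.insert u (pvSnip n u), st2.2)
      else (st2.1, st2.2 ++ [u])) (st.1, [])

def build_snippet_map_py_alt (urls : List String) (notes : List String) : List (String × String) :=
  let res := notes.foldl (fun st n => pvNoteStep n st)
      ((PySem.Dict.empty : PySem.Dict String String), urls)
  (urls.foldl (fun out u =>
      match res.1.get? u with
      | some v => out.insert u v
      | none => out) (PySem.Dict.empty : PySem.Dict String String)).items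

-- ===== PRECONDITION & SPEC =====
def Spec_build_snippet_map_py (urls : List String) (notes : List String) (out : List (String × String)) : Prop := out = build_snippet_map_py_alt urls notes
instance (urls : List String) (notes : List String) (out : List (String × String)) : Decidable (Spec_build_snippet_map_py urls notes out) := by unfold Spec_build_snippet_map_py; infer_instance

-- ===== CLAIM (what is proved, stated in full; the proofs are below) =====
def Claim_equal_build_snippet_map_py : Prop := ∀ (urls : List String) (notes : List String), Dom_build_snippet_map_py urls notes → Spec_build_snippet_map_py urls notes (build_snippet_map_py urls notes)

-- ===== LEMMAS AND PROOFS =====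

-- inner fold of pvNoteStep: lookup in the produced dict
theorem pvInner_get? (n : String) (pending : List String) (snip : PySem.Dict String String)
    (acc : List String) (u : String) :
    (pending.foldl (fun st2 u =>
        if 0 ≤ PySem.Str.find n u then (st2.1.insert u (pvSnip n u), st2.2)
        else (st2.1, st2.2 ++ [u])) (snip, acc)).1.get? u =
      if u ∈ pending ∧ 0 ≤ PySem.Str.find n u then some (pvSnip n u) else snip.get? u := by
  induction pending generalizing snip acc with
  | nil => simp
  | cons p rest ih =>
    simp only [List.foldl_cons]
    by_cases hp : 0 ≤ PySem.Str.find n p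
    · rw [if_pos hp, ih]
      by_cases hu : u ∈ rest ∧ 0 ≤ PySem.Str.find n u
      · rw [if_pos hu, if_pos ⟨List.mem_cons_of_mem _ hu.1, hu.2⟩]
      · rw [if_neg hu]
        by_cases hue : u = p
        · subst hue
          rw [PySem.Dict.get?_insert_self, if_pos ⟨List.mem_cons_self, hp⟩]
        · rw [PySem.Dict.get?_insert_of_ne _ _ hue,
            if_neg (fun h => hu ⟨(List.mem_cons.mp h.1).resolve_left hue, h.2⟩)]
    · rw [if_neg hp, ih]
      by_cases hu : u ∈ rest ∧ 0 ≤ PySem.Str.find n u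
      · rw [if_pos hu, if_pos ⟨List.mem_cons_of_mem _ hu.1, hu.2⟩]
      · rw [if_neg hu]
        refine (if_neg (fun h => ?_)).symm
        rcases List.mem_cons.mp h.1 with he | hr
        · exact hp (he ▸ h.2)
        · exact hu ⟨hr, h.2⟩

-- inner fold of pvNoteStep: the remaining list is a filter
theorem pvInner_rem (n : String) (pending : List String) (snip : PySem.Dict String String)
    (acc : List String) :
    (pending.foldl (fun st2 u =>
        if 0 ≤ PySem.Str.find n u then (st2.1.insert u (pvSnip n u), st2.2)
        else (st2.1, st2.2 ++ [u])) (snip, acc)).2 =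
      acc ++ pending.filter (fun u => !decide (0 ≤ PySem.Str.find n u)) := by
  induction pending generalizing snip acc with
  | nil => simp
  | cons p rest ih =>
    simp only [List.foldl_cons, List.filter_cons]
    by_cases hp : 0 ≤ PySem.Str.find n p
    · have hb : (!decide (0 ≤ PySem.Str.find n p)) = false := by
        rw [decide_eq_true hp]; rfl
      rw [if_pos hp, ih, hb, if_neg Bool.false_ne_true]
    · have hb : (!decide (0 ≤ PySem.Str.find n p)) = true := by
        rw [decide_eq_false hp]; rfl
      rw [if_neg hp, ih, hb, if_pos rfl, List.append_assoc, List.singleton_append]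

-- outer fold over the notes: lookup in the final snip dict
theorem pvOuter_get? (notes : List String) (snip : PySem.Dict String String)
    (pending : List String) (u : String) :
    (notes.foldl (fun st n => pvNoteStep n st) (snip, pending)).1.get? u =
      if u ∈ pending then
        (match pvFindNote u notes with
         | some v => some v
         | none => snip.get? u)
      else snip.get? u := by
  induction notes generalizing snip pending with
  | nil => simp [pvFindNote]
  | cons n rest ih =>
    simp only [List.foldl_cons]
    have hstep : pvNoteStep n (snip, pending) =
        ((pending.foldl (fun st2 u =>
            if 0 ≤ PySem.Str.find n u then (st2.1.insert u (pvSnip n u), st2.2)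
            else (st2.1, st2.2 ++ [u])) (snip, [])).1,
         pending.filter (fun u => !decide (0 ≤ PySem.Str.find n u))) := by
      unfold pvNoteStep
      refine Prod.ext rfl ?_
      rw [pvInner_rem]; simp
    rw [hstep, ih, pvInner_get?]
    have hfind : PySem.Str.isIn u n = true ↔ 0 ≤ PySem.Str.find n u := by
      rw [PySem.Str.isIn_iff_infix, PySem.Str.find_nonneg_iff]
    by_cases hmem : u ∈ pending
    · by_cases hf : 0 ≤ PySem.Str.find n u
      · have hin : PySem.Str.isIn u n = true := hfind.mpr hf
        have hnotrem : u ∉ pending.filter (fun u => !decide (0 ≤ PySem.Str.find n u)) := by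
          intro h
          have := (List.mem_filter.mp h).2
          simp only [Bool.not_eq_eq_eq_not, Bool.not_true, decide_eq_false_iff_not] at this
          exact this hf
        rw [if_neg hnotrem, if_pos (And.intro hmem hf), if_pos hmem,
          show pvFindNote u (n :: rest) = some (pvSnip n u) by
            show (if PySem.Str.isIn u n = true then some (pvSnip n u)
              else pvFindNote u rest) = some (pvSnip n u)
            rw [if_pos hin]]
      · have hin : PySem.Str.isIn u n = false := by
          rw [Bool.eq_false_iff]; intro h; exact hf (hfind.mp h)
        have hrem : u ∈ pending.filter (fun u => !decide (0 ≤ PySem.Str.find n u)) := by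
          refine List.mem_filter.mpr ⟨hmem, ?_⟩
          simp only [Bool.not_eq_eq_eq_not, Bool.not_true, decide_eq_false_iff_not]
          exact hf
        rw [if_pos hrem, if_pos hmem,
          show pvFindNote u (n :: rest) = pvFindNote u rest by
            show (if PySem.Str.isIn u n = true then some (pvSnip n u)
              else pvFindNote u rest) = pvFindNote u rest
            rw [if_neg (fun h => Bool.false_ne_true (hin ▸ h))],
          if_neg (fun h => hf h.2)]
    · have hnotrem : u ∉ pending.filter (fun u => !decide (0 ≤ PySem.Str.find n u)) := by
        intro h; exact hmem (List.mem_filter.mp h).1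
      rw [if_neg hnotrem, if_neg hmem, if_neg (fun h => hmem h.1)]

-- ===== VERDICT (by name: the statement is the Claim_ definition above) =====
theorem build_snippet_map_py_spec : Claim_equal_build_snippet_map_py := by
  intro urls notes _
  unfold Spec_build_snippet_map_py build_snippet_map_py build_snippet_map_py_alt
  congr 1
  refine PySem.List.foldl_congr_mem urls _ _ _ ?_
  intro acc u hu
  rw [pvOuter_get?, if_pos hu]
  cases pvFindNote u notes with
  | none => simp [PySem.Dict.empty, PySem.Dict.get?]
  | some v => simp
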